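-- pv_equiv track=rewrite | github.com/vivarium-collective/v2ecoli | v2ecoli/viz/network.py | _extract_math_and_doc
-- ===== SOURCE A (Python) =====
-- _MATH_HEADINGS = (
--     'mathematical model', 'mathematics', 'math', 'equations', 'model',
-- )
--
-- def _split_rst_sections(doc: str) -> list[tuple[str, str]]:
--     """Split a reST-style docstring into (heading, body) sections.
--
--     Recognises headings that are followed by an underline made of ``-`` or
--     ``=`` characters. Lines before the first such heading form a synthetic
--     ``''`` (empty-heading) section so the lead paragraph is preserved.
--     """
--     if not doc:
--         return []
--     # Dedent so inline headings keep their underline alignment.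
--     import textwrap
--     lines = textwrap.dedent(doc).splitlines()
--     sections: list[tuple[str, list[str]]] = [('', [])]
--     i = 0
--     while i < len(lines):
--         line = lines[i]
--         nxt = lines[i + 1] if i + 1 < len(lines) else ''
--         if (line.strip()
--                 and nxt.strip()
--                 and set(nxt.strip()) <= set('-=~^"')
--                 and len(nxt.strip()) >= max(3, len(line.strip()) - 2)):
--             sections.append((line.strip(), []))
--             i += 2
--             continue
--         sections[-1][1].append(line)
--         i += 1
--     return [(h, '\n'.join(body).strip('\n')) for h, body in sections]
--
-- def _extract_math_and_doc(raw_doc: str) -> tuple[str, str]: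
--     """Return (math, rest) extracted from a reST-style docstring.
--
--     The ``math`` string contains the joined bodies of any sections whose
--     heading (case-insensitive) matches one of ``_MATH_HEADINGS`` or begins
--     with ``math``. ``rest`` is the remaining prose with those sections
--     removed, so the general Docstring panel no longer duplicates the math.
--     """
--     if not raw_doc:
--         return '', ''
--     sections = _split_rst_sections(raw_doc)
--     math_parts: list[str] = []
--     keep_parts: list[str] = []
--     for heading, body in sections:
--         h = heading.lower().strip()
--         is_math = (
--             h in _MATH_HEADINGS
--             or h.startswith('math')
--             or h.endswith('equations')
--         )
--         if is_math:
--             math_parts.append(body.strip())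
--         else:
--             if heading:
--                 keep_parts.append(heading)
--                 keep_parts.append('-' * len(heading))
--             if body.strip():
--                 keep_parts.append(body.strip())
--             keep_parts.append('')  # blank between sections
--     math = '\n\n'.join(p for p in math_parts if p).strip()
--     rest = '\n'.join(keep_parts).strip()
--     return math, rest
-- ===== SOURCE B (Python) =====
-- _MATH_HEADINGS = (
--     'mathematical model', 'mathematics', 'math', 'equations', 'model',
-- )
--
-- def _is_heading(line, nxt):
--     ls, ns = line.strip(), nxt.strip()
--     return bool(ls) and bool(ns) and set(ns) <= set('-=~^"') and len(ns) >= max(3, len(ls) - 2)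
--
-- def _is_math(heading):
--     h = heading.lower().strip()
--     return h in _MATH_HEADINGS or h.startswith('math') or h.endswith('equations')
--
-- def _keep_parts(h, b):
--     return ([h, '-' * len(h)] if h else []) + ([b.strip()] if b.strip() else []) + ['']
--
-- def _extract_math_and_doc(raw_doc):
--     """Index-table variant: mark heading positions first, then slice sections by index."""
--     if not raw_doc:
--         return '', ''
--     import textwrap
--     lines = textwrap.dedent(raw_doc).splitlines()
--     n = len(lines)
--     # Phase 1: candidate table over (line, next-line) pairs.
--     cand = [_is_heading(line, nxt) for line, nxt in zip(lines, lines[1:] + [''])]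
--     # Phase 2: resolve overlaps: i is a heading iff cand[i] and i-1 was not a heading.
--     heads = []
--     prev = False
--     for i, c in enumerate(cand):
--         cur = c and not prev
--         if cur:
--             heads.append(i)
--         prev = cur
--     # Phase 3: slice the sections out of the line list by index.
--     secs = [('', '\n'.join(lines[:heads[0] if heads else n]).strip('\n'))]
--     secs += [(lines[a].strip(), '\n'.join(lines[a + 2:b]).strip('\n'))
--              for a, b in zip(heads, heads[1:] + [n])]
--     # Phase 4: assemble both outputs with flat comprehensions.
--     math = '\n\n'.join(p for p in (b.strip() for h, b in secs if _is_math(h)) if p).strip()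
--     rest = '\n'.join(
--         part
--         for h, b in secs if not _is_math(h)
--         for part in _keep_parts(h, b)
--     ).strip()
--     return math, rest
-- ===== Notes on version B (the rewrite author's own statement) =====
-- stated objective: alternative
-- what changed: B replaces A's streaming while-loop (which builds a mutable sections list line by line, then classifies it with a second appending loop) by an index-table algorithm: it first computes a boolean candidate table over (line, next-line) pairs, resolves overlapping candidates with an alternation recurrence (a position is a heading when it is a candidate and its predecessor was not), then slices every section directly out of the line list by index, and assembles both outputs with flat comprehensions instead of accumulator loops.
import Mathlib
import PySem

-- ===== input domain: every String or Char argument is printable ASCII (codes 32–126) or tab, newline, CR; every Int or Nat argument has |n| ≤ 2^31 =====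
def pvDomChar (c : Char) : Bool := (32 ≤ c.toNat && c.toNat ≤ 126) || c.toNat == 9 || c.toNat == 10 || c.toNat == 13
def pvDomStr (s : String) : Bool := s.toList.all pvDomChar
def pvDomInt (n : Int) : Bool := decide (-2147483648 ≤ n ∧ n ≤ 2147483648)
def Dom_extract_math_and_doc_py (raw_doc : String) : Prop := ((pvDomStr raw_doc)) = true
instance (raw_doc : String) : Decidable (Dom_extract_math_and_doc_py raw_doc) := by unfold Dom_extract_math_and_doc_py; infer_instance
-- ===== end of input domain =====

-- B replaces A's streaming section-splitting loop + classify loop by an index-table algorithm: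
-- candidate table over (line, next) pairs, heading indices via an alternation recurrence,
-- sections sliced out of the line list by index, outputs assembled with flat comprehensions.

-- ===== SHARED LIBRARY HELPER: textwrap.dedent (hand port of CPython 3.11's regex semantics) =====
-- Exact on '\n'-separated lines: whitespace-only lines are normalized to '', the margin is the
-- longest common ' '/'\t' prefix of the remaining nonempty lines, and it is removed from every
-- line it prefixes.  Both Pythons call textwrap.dedent, so both ports use this helper.
def pvIsBlankWs (l : List Char) : Bool := !l.isEmpty && l.all (fun c => c == ' ' || c == '\t')

def pvIndent (l : List Char) : List Char := l.takeWhile (fun c => c == ' ' || c == '\t')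

def pvLcp : List Char → List Char → List Char
  | x :: xs, y :: ys => if x = y then x :: pvLcp xs ys else []
  | _, _ => []

def pvDedent (cs : List Char) : List Char :=
  let nlines := PySem.Chars.splitOn cs ['\n']
  let norm := nlines.map (fun l => if pvIsBlankWs l then [] else l)
  let indents := (norm.filter (fun l => !l.isEmpty)).map pvIndent
  let margin := match indents with
    | [] => ([] : List Char)
    | i0 :: rest => rest.foldl pvLcp i0
  PySem.Chars.join ['\n'] (norm.map (fun l =>
    if !margin.isEmpty && margin.isPrefixOf l then l.drop margin.length else l))

-- Shared: the heading-detection condition (textually identical in both Pythons) and the math test.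
def pvIsHeading (line nxt : List Char) : Bool :=
  let ls := PySem.Chars.strip line
  let ns := PySem.Chars.strip nxt
  !ls.isEmpty && !ns.isEmpty &&
    PySem.Set.issubset (PySem.Set.ofList ns) (PySem.Set.ofList ("-=~^\"".toList)) &&
    decide (max (3 : Int) ((ls.length : Int) - 2) ≤ (ns.length : Int))

def pvMathHeadings : List (List Char) :=
  ["mathematical model".toList, "mathematics".toList, "math".toList, "equations".toList, "model".toList]

def pvIsMathHeading (h : List Char) : Bool :=
  pvMathHeadings.contains h || PySem.Chars.startswith h ("math".toList)
    || PySem.Chars.endswith h ("equations".toList)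

-- ===== PORT A =====
-- _split_rst_sections' while loop: `acc` holds the completed sections, `cur` the (mutable) last one.
def pvSplitLoop : List (List Char) → (List Char × List (List Char)) →
    List (List Char × List (List Char)) → List (List Char × List (List Char))
  | [], cur, acc => acc ++ [cur]
  | line :: rest, cur, acc =>
    let nxt := rest.headD []
    if pvIsHeading line nxt then
      pvSplitLoop rest.tail (PySem.Chars.strip line, []) (acc ++ [cur])
    else
      pvSplitLoop rest (cur.1, cur.2 ++ [line]) acc
termination_by ls _ _ => ls.length
decreasing_by all_goals (simp [List.length_tail]; try omega)

-- final list comprehension of _split_rst_sections: (h, '\n'.join(body).strip('\n'))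
def pvToSec (hb : List Char × List (List Char)) : List Char × List Char :=
  (hb.1, PySem.Chars.stripChars (PySem.Chars.join ['\n'] hb.2) ['\n'])

def pvSplitSections (cs : List Char) : List (List Char × List Char) :=
  if cs.isEmpty then []
  else ((pvSplitLoop (PySem.Chars.splitlines (pvDedent cs)) ([], []) []).map pvToSec)

-- the `for heading, body in sections` classification loop of _extract_math_and_doc
def pvClassifyA (st : List (List Char) × List (List Char)) (sec : List Char × List Char) :
    List (List Char) × List (List Char) :=
  let h := PySem.Chars.strip (PySem.Chars.lower sec.1)
  if pvIsMathHeading h then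
    (st.1 ++ [PySem.Chars.strip sec.2], st.2)
  else
    let kp := if !sec.1.isEmpty then st.2 ++ [sec.1, List.replicate sec.1.length '-'] else st.2
    let kp := if !(PySem.Chars.strip sec.2).isEmpty then kp ++ [PySem.Chars.strip sec.2] else kp
    (st.1, kp ++ [[]])

def extract_math_and_doc_py (raw_doc : String) : String × String :=
  if raw_doc.toList.isEmpty then ("", "")
  else
    let sections := pvSplitSections raw_doc.toList
    let st := sections.foldl pvClassifyA ([], [])
    (String.ofList (PySem.Chars.strip (PySem.Chars.join ['\n', '\n'] (st.1.filter (fun p => !p.isEmpty)))),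
     String.ofList (PySem.Chars.strip (PySem.Chars.join ['\n'] st.2)))

-- ===== PORT B =====
-- Source B's _is_math(heading)
def pvIsMathB (heading : List Char) : Bool :=
  pvIsMathHeading (PySem.Chars.strip (PySem.Chars.lower heading))

-- Phase 1 of Source B: cand = [_is_heading(line, nxt) for line, nxt in zip(lines, lines[1:] + [''])]
def pvCandList (lines : List (List Char)) : List Bool :=
  (lines.zip (lines.drop 1 ++ [[]])).map (fun p => pvIsHeading p.1 p.2)

-- Phase 2 of Source B: the enumerate loop with the `prev` flag collecting heading indices.
def pvHeadsLoop : List Bool → Nat → Bool → List Nat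
  | [], _, _ => []
  | c :: rest, i, prev =>
    let cur := c && !prev
    (if cur then [i] else []) ++ pvHeadsLoop rest (i + 1) cur

-- Phase 3 of Source B, one sliced section: (lines[a].strip(), '\n'.join(lines[a+2:b]).strip('\n'))
def pvSecB (lines : List (List Char)) (a b : Nat) : List Char × List Char :=
  (PySem.Chars.strip (lines.getD a []),
   PySem.Chars.stripChars (PySem.Chars.join ['\n'] ((lines.take b).drop (a + 2))) ['\n'])

-- Source B's _keep_parts(h, b)
def pvKeepOf (s : List Char × List Char) : List (List Char) :=
  (if !s.1.isEmpty then [s.1, List.replicate s.1.length '-'] else []) ++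
  (if !(PySem.Chars.strip s.2).isEmpty then [PySem.Chars.strip s.2] else []) ++ [[]]

def extract_math_and_doc_py_alt (raw_doc : String) : String × String :=
  if raw_doc.toList.isEmpty then ("", "")
  else
    let lines := PySem.Chars.splitlines (pvDedent raw_doc.toList)
    let n := lines.length
    let heads := pvHeadsLoop (pvCandList lines) 0 false
    let secs :=
      ([], PySem.Chars.stripChars (PySem.Chars.join ['\n'] (lines.take (heads.headD n))) ['\n'])
        :: (heads.zip (heads.drop 1 ++ [n])).map (fun p => pvSecB lines p.1 p.2)
    let math := (secs.filter (fun s => pvIsMathB s.1)).map (fun s => PySem.Chars.strip s.2)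
    let keep := (secs.filter (fun s => !pvIsMathB s.1)).flatMap pvKeepOf
    (String.ofList (PySem.Chars.strip (PySem.Chars.join ['\n', '\n'] (math.filter (fun p => !p.isEmpty)))),
     String.ofList (PySem.Chars.strip (PySem.Chars.join ['\n'] keep)))

-- ===== PRECONDITION & SPEC =====
def Spec_extract_math_and_doc_py (raw_doc : String) (out : String × String) : Prop := out = extract_math_and_doc_py_alt raw_doc
instance (raw_doc : String) (out : String × String) : Decidable (Spec_extract_math_and_doc_py raw_doc out) := by unfold Spec_extract_math_and_doc_py; infer_instance

-- ===== CLAIM (what is proved, stated in full; the proofs are below) =====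
def Claim_equal_extract_math_and_doc_py : Prop := ∀ (raw_doc : String), Dom_extract_math_and_doc_py raw_doc → Spec_extract_math_and_doc_py raw_doc (extract_math_and_doc_py raw_doc)

-- ===== LEMMAS AND PROOFS =====

-- A's split loop with the accumulator stripped off.
def pvSecsRaw : List (List Char) → (List Char × List (List Char)) →
    List (List Char × List (List Char))
  | [], cur => [cur]
  | line :: rest, cur =>
    if pvIsHeading line (rest.headD []) then
      cur :: pvSecsRaw rest.tail (PySem.Chars.strip line, [])
    else
      pvSecsRaw rest (cur.1, cur.2 ++ [line])
termination_by ls _ => ls.length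
decreasing_by all_goals (simp [List.length_tail]; try omega)

theorem pv_splitLoop_eq (ls : List (List Char)) (cur : List Char × List (List Char))
    (acc : List (List Char × List (List Char))) :
    pvSplitLoop ls cur acc = acc ++ pvSecsRaw ls cur := by
  induction ls, cur, acc using pvSplitLoop.induct with
  | case1 cur acc => simp [pvSplitLoop, pvSecsRaw]
  | case2 line rest cur acc nxt hh ih =>
    rw [pvSplitLoop]; simp only [nxt] at hh ⊢
    rw [if_pos hh, ih, pvSecsRaw, if_pos hh, List.append_assoc]; rfl
  | case3 line rest cur acc nxt hh ih =>
    rw [pvSplitLoop]; simp only [nxt] at hh ⊢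
    rw [if_neg hh, ih, pvSecsRaw, if_neg hh]

theorem pv_candList_cons (l : List Char) (rest : List (List Char)) :
    pvCandList (l :: rest) = pvIsHeading l (rest.headD []) :: pvCandList rest := by
  cases rest <;> simp [pvCandList]

theorem pv_headsLoop_ge (l : List Bool) (i : Nat) (prev : Bool) :
    ∀ k ∈ pvHeadsLoop l i prev, i ≤ k := by
  induction l generalizing i prev with
  | nil => simp [pvHeadsLoop]
  | cons c rest ih =>
    intro k hk
    rw [pvHeadsLoop] at hk
    simp only [List.mem_append] at hk
    rcases hk with hk | hk
    · split at hk <;> simp at hk; omega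
    · have := ih (i + 1) _ k hk; omega

theorem pv_headsLoop_absorb (c : Bool) (l : List Bool) (i : Nat) :
    pvHeadsLoop (c :: l) i true = pvHeadsLoop l (i + 1) false := by
  simp [pvHeadsLoop]

-- The section builder driven by the heading-index list (raw bodies, not yet joined).
def pvGo (L : List (List Char)) : List Nat → Nat → List Char → List (List Char) →
    List (List Char × List (List Char))
  | [], j, h, body => [(h, body ++ L.drop j)]
  | k :: ks, j, h, body =>
    (h, body ++ (L.drop j).take (k - j)) ::
      pvGo L ks (k + 2) (PySem.Chars.strip (L.getD k [])) []

theorem pv_go_shift (L : List (List Char)) (hs : List Nat) (j : Nat) (h line : List Char)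
    (body : List (List Char)) (hdrop : L.drop j = line :: L.drop (j + 1))
    (hge : ∀ k ∈ hs, j + 1 ≤ k) :
    pvGo L hs j h body = pvGo L hs (j + 1) h (body ++ [line]) := by
  cases hs with
  | nil => simp [pvGo, hdrop]
  | cons k ks =>
    have hk : j + 1 ≤ k := hge k (by simp)
    have : k - j = (k - (j + 1)) + 1 := by omega
    simp [pvGo, hdrop, this]

theorem pv_headsLoop_cand_absorb (ls : List (List Char)) (i : Nat) :
    pvHeadsLoop (pvCandList ls) i true = pvHeadsLoop (pvCandList ls.tail) (i + 1) false := by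
  cases ls with
  | nil => rfl
  | cons l rest => rw [pv_candList_cons, pv_headsLoop_absorb]; rfl

theorem pv_secsRaw_eq_go (L : List (List Char)) :
    ∀ (m j : Nat) (h : List Char) (body : List (List Char)), L.length ≤ j + m →
      pvSecsRaw (L.drop j) (h, body)
        = pvGo L (pvHeadsLoop (pvCandList (L.drop j)) j false) j h body := by
  intro m
  induction m with
  | zero =>
    intro j h body hm
    have hd : L.drop j = [] := List.drop_eq_nil_of_le (by omega)
    rw [hd]
    simp [pvSecsRaw, pvCandList, pvHeadsLoop, pvGo, hd]
  | succ m ih =>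
    intro j h body hm
    by_cases hj : L.length ≤ j
    · have hd : L.drop j = [] := List.drop_eq_nil_of_le hj
      rw [hd]
      simp [pvSecsRaw, pvCandList, pvHeadsLoop, pvGo, hd]
    · have hj' : j < L.length := Nat.lt_of_not_le hj
      have hdrop : L.drop j = L[j] :: L.drop (j + 1) := List.drop_eq_getElem_cons hj'
      have hget : L.getD j [] = L[j] := List.getD_eq_getElem L [] hj' 
      rw [hdrop, pvSecsRaw, pv_candList_cons]
      by_cases hc : pvIsHeading L[j] ((L.drop (j + 1)).headD []) = true
      · rw [if_pos hc]
        have habs : pvHeadsLoop (pvIsHeading L[j] ((L.drop (j + 1)).headD []) :: pvCandList (L.drop (j + 1))) j false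
            = j :: pvHeadsLoop (pvCandList (L.drop (j + 2))) (j + 2) false := by
          rw [pvHeadsLoop]
          simp only [hc, Bool.not_false, Bool.and_self, if_pos]
          rw [pv_headsLoop_cand_absorb, List.tail_drop]
          rfl
        rw [habs, pvGo]
        have htail : (L.drop (j + 1)).tail = L.drop (j + 2) := by
          rw [List.tail_drop]
        rw [htail, ih (j + 2) _ _ (by omega), hget]
        simp
      · rw [if_neg hc]
        have habs : pvHeadsLoop (pvIsHeading L[j] ((L.drop (j + 1)).headD []) :: pvCandList (L.drop (j + 1))) j false
            = pvHeadsLoop (pvCandList (L.drop (j + 1))) (j + 1) false := by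
          rw [pvHeadsLoop]
          simp only [Bool.not_false, Bool.and_true]
          rw [eq_false_of_ne_true hc]
          rfl
        rw [habs, ih (j + 1) _ _ (by omega)]
        exact (pv_go_shift L _ j h L[j] body hdrop (pv_headsLoop_ge _ _ _)).symm

theorem pv_go_map (L : List (List Char)) :
    ∀ (hs : List Nat) (j : Nat) (h : List Char) (body : List (List Char)),
      (pvGo L hs j h body).map pvToSec
        = pvToSec (h, body ++ (L.take (hs.headD L.length)).drop j)
            :: (hs.zip (hs.drop 1 ++ [L.length])).map (fun p => pvSecB L p.1 p.2) := by
  intro hs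
  induction hs with
  | nil => intro j h body; simp [pvGo]
  | cons k ks ih =>
    intro j h body
    rw [pvGo, List.map_cons, ih]
    have hdt : (L.drop j).take (k - j) = (L.take k).drop j := by
      rw [List.drop_take]
    cases ks with
    | nil =>
      simp only [List.headD, List.drop]
      rw [hdt]
      rfl
    | cons k' ks' =>
      simp only [List.headD, List.drop]
      rw [hdt]
      rfl

theorem pv_classify_eq (secs : List (List Char × List Char)) :
    ∀ st, secs.foldl pvClassifyA st
      = (st.1 ++ (secs.filter (fun s => pvIsMathB s.1)).map (fun s => PySem.Chars.strip s.2),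
         st.2 ++ (secs.filter (fun s => !pvIsMathB s.1)).flatMap pvKeepOf) := by
  induction secs with
  | nil => intro st; simp
  | cons s rest ih =>
    intro st
    rw [List.foldl_cons, ih]
    by_cases hm : pvIsMathB s.1 = true
    · simp only [pvClassifyA, pvIsMathB] at *
      simp [hm, List.append_assoc]
    · simp only [pvClassifyA, pvIsMathB] at *
      rw [eq_false_of_ne_true hm]
      simp only [List.filter_cons, eq_false_of_ne_true hm, Bool.not_false, if_pos,
        Bool.false_eq_true, List.flatMap_cons, pvKeepOf]
      split_ifs <;> simp_all [List.append_assoc]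

-- ===== VERDICT (by name: the statement is the Claim_ definition above) =====
theorem extract_math_and_doc_py_spec : Claim_equal_extract_math_and_doc_py := by
  intro raw_doc _
  unfold Spec_extract_math_and_doc_py extract_math_and_doc_py extract_math_and_doc_py_alt
  by_cases he : raw_doc.toList.isEmpty
  · simp [he]
  · simp only [he, Bool.false_eq_true, if_false]
    rw [pvSplitSections, if_neg he]
    rw [pv_splitLoop_eq, List.nil_append]
    have h0 : PySem.Chars.splitlines (pvDedent raw_doc.toList)
        = (PySem.Chars.splitlines (pvDedent raw_doc.toList)).drop 0 := rfl
    rw [h0, pv_secsRaw_eq_go _ (PySem.Chars.splitlines (pvDedent raw_doc.toList)).length 0 _ _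
          (by omega), ← h0, pv_go_map, pv_classify_eq]
    simp only [pvToSec, List.nil_append, List.drop_zero]
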